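-- pv_equiv track=rewrite | github.com/YanzheL/tacotron | text/encoders/chinese/chinese_encoder.py | concat_binarys
-- ===== SOURCE A (Python) =====
-- def mask(bits):
--     return ~ (-1 >> bits << bits)
--
-- def concat_binarys(codes, bits):
--     encode = 0
--     shift = 0
--     for code, bit in zip(codes, bits):
--         tp = code & mask(bit)
--         tp <<= shift
--         encode += tp
--         shift += bit
--     return encode
-- ===== SOURCE B (Python) =====
-- def concat_binarys(codes, bits):
--     encode = 0
--     for code, bit in reversed(list(zip(codes, bits))):
--         encode = (encode << bit) + (code & ((1 << bit) - 1))
--     return encode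
-- ===== Notes on version B (the rewrite author's own statement) =====
-- stated objective: simpler
-- what changed: Horner-style packing: iterate the zipped (code, bit) pairs in reverse, shifting a single accumulator left by each width before adding the masked code, eliminating A's running shift counter and its ~(-1>>b<<b) mask helper.
import Mathlib
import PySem

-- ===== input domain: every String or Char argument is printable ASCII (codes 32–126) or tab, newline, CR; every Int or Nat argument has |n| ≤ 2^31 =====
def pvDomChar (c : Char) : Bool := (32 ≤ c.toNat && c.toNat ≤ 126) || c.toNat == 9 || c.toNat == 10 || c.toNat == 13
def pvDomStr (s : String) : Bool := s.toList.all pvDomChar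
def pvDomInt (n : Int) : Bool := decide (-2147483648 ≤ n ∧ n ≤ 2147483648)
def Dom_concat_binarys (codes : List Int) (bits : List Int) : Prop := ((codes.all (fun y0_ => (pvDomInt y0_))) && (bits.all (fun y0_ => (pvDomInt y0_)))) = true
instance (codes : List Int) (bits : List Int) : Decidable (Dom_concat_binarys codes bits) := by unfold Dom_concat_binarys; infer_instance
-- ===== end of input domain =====

-- B repacks the codes Horner-style over the reversed zip, dropping A's running shift counter; objective: simpler. (A and B both raise on a negative width in the zip; Pre_ excludes exactly those.)

-- ===== PORT A =====
-- mask(bits) = ~(-1 >> bits << bits)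
def pyMask (bit : Int) : Int := Int.not (((-1 : Int) >>> bit.toNat) <<< bit.toNat)

def concat_binarys (codes : List Int) (bits : List Int) : Int :=
  ((codes.zip bits).foldl
    (fun (st : Int × Int) (p : Int × Int) =>
      let tp := PySem.Int.band p.1 (pyMask p.2)
      let tp := tp <<< st.2.toNat
      (st.1 + tp, st.2 + p.2))
    (0, 0)).1

-- ===== PORT B =====
def concat_binarys_alt (codes : List Int) (bits : List Int) : Int :=
  ((codes.zip bits).reverse.foldl
    (fun (encode : Int) (p : Int × Int) =>
      (encode <<< p.2.toNat) + PySem.Int.band p.1 (((1 : Int) <<< p.2.toNat) - 1))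
    0)

-- ===== PRECONDITION & SPEC =====
-- Pre_ excludes exactly the inputs where Python A raises ValueError (a negative shift count, i.e. a negative width among the zipped pairs); B raises there too.
def Pre_concat_binarys (codes : List Int) (bits : List Int) : Prop :=
  ∀ p ∈ codes.zip bits, 0 ≤ p.2
instance (codes : List Int) (bits : List Int) : Decidable (Pre_concat_binarys codes bits) := by unfold Pre_concat_binarys; infer_instance

def pvWitness_concat_binarys : List Int × List Int := ([5, 3, 9], [3, 2, 4])

def Spec_concat_binarys (codes : List Int) (bits : List Int) (out : Int) : Prop := out = concat_binarys_alt codes bits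
instance (codes : List Int) (bits : List Int) (out : Int) : Decidable (Spec_concat_binarys codes bits out) := by unfold Spec_concat_binarys; infer_instance

-- ===== CLAIM (what is proved, stated in full; the proofs are below) =====
def Claim_equal_concat_binarys : Prop := ∀ (codes : List Int) (bits : List Int), Dom_concat_binarys codes bits → Pre_concat_binarys codes bits → Spec_concat_binarys codes bits (concat_binarys codes bits)

-- ===== LEMMAS AND PROOFS =====

theorem pyMask_eq (b : Int) : pyMask b = ((1 : Int) <<< b.toNat) - 1 := by
  unfold pyMask
  have h1 : ((-1 : Int) >>> b.toNat) = -1 := by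
    show Int.negSucc (0 >>> b.toNat) = Int.negSucc 0
    simp
  have h2 : ((-1 : Int) <<< b.toNat) = -(2 ^ b.toNat) := by
    simp [Int.shiftLeft_eq]
  have h3 : ∀ a : Int, Int.not a = -a - 1 := by
    intro a
    cases a with
    | ofNat m => show Int.negSucc m = -(m : Int) - 1; omega
    | negSucc m => show (m : Int) = -(Int.negSucc m) - 1; omega
  rw [h1, h2, h3, Int.shiftLeft_eq]
  ring

-- the generalized loop invariant relating A's fold (with its shift counter) to B's reverse Horner fold
theorem fold_eq (L : List (Int × Int)) (h : ∀ p ∈ L, 0 ≤ p.2) (e s : Int) (hs : 0 ≤ s) :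
    (L.foldl
      (fun (st : Int × Int) (p : Int × Int) =>
        let tp := PySem.Int.band p.1 (pyMask p.2)
        let tp := tp <<< st.2.toNat
        (st.1 + tp, st.2 + p.2))
      (e, s)).1
    = e + 2 ^ s.toNat *
        (L.reverse.foldl
          (fun (encode : Int) (p : Int × Int) =>
            (encode <<< p.2.toNat) + PySem.Int.band p.1 (((1 : Int) <<< p.2.toNat) - 1))
          0) := by
  induction L generalizing e s with
  | nil => simp
  | cons p L ih =>
    have hp : 0 ≤ p.2 := h p (by simp)
    have hL : ∀ q ∈ L, 0 ≤ q.2 := fun q hq => h q (by simp [hq])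
    simp only [List.foldl_cons, List.reverse_cons, List.foldl_append, List.foldl_cons,
      List.foldl_nil]
    rw [ih hL _ _ (by omega)]
    have hts : (s + p.2).toNat = s.toNat + p.2.toNat := by omega
    rw [hts]
    simp only [pyMask_eq, Int.shiftLeft_eq]
    ring

theorem concat_binarys_spec : Claim_equal_concat_binarys := by
  intro codes bits _ hpre
  unfold Spec_concat_binarys concat_binarys concat_binarys_alt
  rw [fold_eq (codes.zip bits) hpre 0 0 le_rfl]
  simp

-- ===== VERDICT (by name: the statement is the Claim_ definition above) =====
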